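-- pv_equiv track=rewrite | github.com/incremen/pyfuncs_to_chars | core/visualize.py | find_innermost
-- ===== SOURCE A (Python) =====
-- def find_innermost(expr):
--     """Find the innermost function call. Returns (start, end) or None.
--
--     Searches right-to-left for '(' that is preceded by a function name.
--     Skips bare parentheses from tuple/group literals like (0,).
--     """
--     pos = len(expr)
--     while True:
--         pos = expr.rfind('(', 0, pos)
--         if pos == -1:
--             return None
--         # Walk back to find the function name
--         i = pos
--         while i > 0 and (expr[i - 1].isalpha() or expr[i - 1] == '_'):
--             i -= 1
--         # Must have a function name - skip bare parens
--         if i == pos: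
--             continue
--         close = expr.find(')', pos)
--         if close == -1:
--             continue
--         return i, close + 1
-- ===== SOURCE B (Python) =====
-- def find_innermost(expr):
--     """Find the innermost function call. Returns (start, end) or None.
--
--     Single left-to-right pass: track the start of the current run of
--     identifier characters, record every '(' preceded by such a run as a
--     candidate, keep the right-most candidate that still has a ')' after it.
--     """
--     last_close = expr.rfind(')')
--     best = None
--     run_start = 0
--     for k, ch in enumerate(expr):
--         if ch.isalpha() or ch == '_':
--             continue
--         if ch == '(' and run_start < k and k < last_close:
--             best = (run_start, k)
--         run_start = k + 1
--     if best is None: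
--         return None
--     i, p = best
--     return i, expr.find(')', p) + 1
-- ===== Notes on version B (the rewrite author's own statement) =====
-- stated objective: alternative
-- what changed: A repeatedly scans right-to-left with rfind plus a walk-back loop per open paren; B makes one left-to-right pass that tracks the start of the current identifier run, records each named-call open paren as a candidate, keeps the right-most candidate that still has a close paren after it, and post-processes only the winner.
import Mathlib
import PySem

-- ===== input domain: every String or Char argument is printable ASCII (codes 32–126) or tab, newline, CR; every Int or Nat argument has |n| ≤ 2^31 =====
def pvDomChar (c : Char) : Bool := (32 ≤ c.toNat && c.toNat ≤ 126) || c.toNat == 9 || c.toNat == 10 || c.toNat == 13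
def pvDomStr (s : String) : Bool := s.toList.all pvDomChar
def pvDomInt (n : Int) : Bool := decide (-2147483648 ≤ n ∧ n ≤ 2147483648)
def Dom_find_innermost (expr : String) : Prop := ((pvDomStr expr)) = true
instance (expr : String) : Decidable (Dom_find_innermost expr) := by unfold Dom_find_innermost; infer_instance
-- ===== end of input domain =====

-- B replaces A's repeated right-to-left rfind/walk-back scanning by one left-to-right
-- pass that collects candidate calls and then selects the right-most qualifying one
-- (objective: alternative decomposition, same exact result).

-- ===== PORT A =====

-- Port of A's inner walk-back loop: `while i > 0 and (expr[i-1].isalpha() or expr[i-1] == '_'): i -= 1`.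
-- expr[i-1] is always in range when A's loop tests it, so getD's default is never read on those calls.
def pvWalk (cs : List Char) : Nat → Nat
  | 0 => 0
  | i+1 => if PySem.Chars.isalpha (cs.getD i ' ') || cs.getD i ' ' == '_' then pvWalk cs i else i + 1

-- Termination fact for A's loop: a successful `expr.rfind('(', 0, pos)` is an index < pos.
theorem pv_rfind_go_spec (xs : List Char) (c : Char) (j : Nat) :
    (PySem.Chars.rfind.go xs [c] j = -1 ∧ ∀ i ≤ j, xs[i]? ≠ some c) ∨
    (∃ k : Nat, PySem.Chars.rfind.go xs [c] j = (k : Int) ∧ k ≤ j ∧ xs[k]? = some c ∧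
      ∀ i, k < i → i ≤ j → xs[i]? ≠ some c) := by
  have hpre : ∀ i : Nat, ([c] <+: xs.drop i) ↔ xs[i]? = some c := by
    intro i
    have hd : (xs.drop i)[0]? = xs[i]? := by simp [List.getElem?_drop]
    cases h : (xs.drop i) with
    | nil =>
        rw [h] at hd
        rw [← hd]
        simp
    | cons b t =>
        rw [h] at hd
        simp only [List.getElem?_cons_zero] at hd
        rw [← hd]
        simp [List.cons_prefix_cons, eq_comm]
  induction j with
  | zero =>
      by_cases h : xs[0]? = some c
      · right; refine ⟨0, ?_, le_refl _, h, by omega⟩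
        have hp : [c] <+: xs := by simpa using (hpre 0).2 h
        simp [PySem.Chars.rfind.go, hp]
      · left
        constructor
        · have hp : ¬ ([c] <+: xs) := fun hh => h ((hpre 0).1 (by simpa using hh))
          simp [PySem.Chars.rfind.go, hp]
        · intro i hi; interval_cases i; exact h
  | succ j ih =>
      by_cases h : xs[j+1]? = some c
      · right
        refine ⟨j+1, ?_, le_refl _, h, by omega⟩
        have hp : [c] <+: xs.drop (j+1) := (hpre (j+1)).2 h
        simp [PySem.Chars.rfind.go, hp]
      · have hgo : PySem.Chars.rfind.go xs [c] (j+1) = PySem.Chars.rfind.go xs [c] j := by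
          have hp : ¬ ([c] <+: xs.drop (j+1)) := fun hh => h ((hpre (j+1)).1 hh)
          simp [PySem.Chars.rfind.go, hp]
        rcases ih with ⟨h1, h2⟩ | ⟨k, h1, h2, h3, h4⟩
        · left
          refine ⟨by rw [hgo]; exact h1, ?_⟩
          intro i hi
          rcases Nat.lt_or_ge i (j+1) with hlt | hge
          · exact h2 i (by omega)
          · have : i = j + 1 := by omega
            simpa [this] using h
        · right
          refine ⟨k, by rw [hgo]; exact h1, by omega, h3, ?_⟩
          intro i hik hij
          rcases Nat.lt_or_ge i (j+1) with hlt | hge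
          · exact h4 i hik (by omega)
          · have : i = j + 1 := by omega
            simpa [this] using h

-- A successful rfind over a list is an index into the list.
theorem pv_rfind_spec (xs : List Char) (c : Char) :
    (PySem.Chars.rfind xs [c] = -1 ∧ ∀ i : Nat, xs[i]? ≠ some c) ∨
    (∃ k : Nat, PySem.Chars.rfind xs [c] = (k : Int) ∧ k < xs.length ∧ xs[k]? = some c ∧
      ∀ i, k < i → xs[i]? ≠ some c) := by
  rcases pv_rfind_go_spec xs c xs.length with ⟨h1, h2⟩ | ⟨k, h1, h2, h3, h4⟩
  · left
    refine ⟨h1, ?_⟩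
    intro i
    rcases Nat.lt_or_ge i (xs.length + 1) with hlt | hge
    · exact h2 i (by omega)
    · rw [List.getElem?_eq_none (by omega : xs.length ≤ i)]
      simp
  · right
    have hk : k < xs.length := by
      by_contra hk
      rw [List.getElem?_eq_none (by omega : xs.length ≤ k)] at h3
      simp at h3
    refine ⟨k, h1, hk, h3, ?_⟩
    intro i hik
    rcases Nat.lt_or_ge i (xs.length + 1) with hlt | hge
    · exact h4 i hik (by omega)
    · rw [List.getElem?_eq_none (by omega : xs.length ≤ i)]
      simp

-- rfind('(', 0, pos): the result, if not -1, is the greatest '('-index below pos.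
theorem pv_rfindFrom_spec (expr : String) (pos : Nat) :
    (PySem.Str.rfindFrom expr "(" 0 (some (pos : Int)) = -1 ∧
       ∀ i < pos, expr.toList[i]? ≠ some '(') ∨
    (∃ k : Nat, PySem.Str.rfindFrom expr "(" 0 (some (pos : Int)) = (k : Int) ∧ k < pos ∧
       expr.toList[k]? = some '(' ∧ ∀ i, k < i → i < pos → expr.toList[i]? ≠ some '(') := by
  have hcs : PySem.Str.rfindFrom expr "(" 0 (some (pos : Int)) =
      PySem.Chars.rfindFrom expr.toList ['('] 0 (some (pos : Int)) := by simp
  rw [hcs]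
  set cs := expr.toList with hcsdef
  set n : Nat := cs.length with hn
  have hexp : PySem.Chars.rfindFrom cs ['('] 0 (some (pos : Int)) =
      (if PySem.Chars.rfind (cs.take (min n pos)) ['('] = -1 then (-1 : Int)
       else PySem.Chars.rfind (cs.take (min n pos)) ['(']) := by
    simp only [PySem.Chars.rfindFrom]
    by_cases h : (n : Int) < (pos : Int)
    · have hmin : min n pos = n := by omega
      rw [← hn]
      simp only [h, if_pos]
      have h0 : ¬ ((n : Int) < 0) := by omega
      have h1 : ¬ ((0 : Int) < 0) := by omega
      simp only [h1, if_false]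
      have h2 : ¬ ((n : Int) < 0) := by omega
      simp [hmin, Int.toNat_natCast]
    · have hmin : min n pos = pos := by omega
      rw [← hn]
      simp only [h, if_false]
      have h0 : ¬ ((pos : Int) < 0) := by omega
      have h1 : ¬ ((0 : Int) < 0) := by omega
      simp only [h0, h1, if_false]
      simp [hmin, Int.toNat_natCast]
  have htake : ∀ i : Nat, ((cs.take (min n pos))[i]? = some '(') ↔ (i < pos ∧ cs[i]? = some '(') := by
    intro i
    rw [List.getElem?_take]
    by_cases hi : i < min n pos
    · simp only [if_pos hi]
      exact ⟨fun h => ⟨by omega, h⟩, fun h => h.2⟩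
    · simp only [if_neg hi]
      constructor
      · intro h; exact absurd h (by simp)
      · rintro ⟨hip, hg⟩
        have hin : i < n := by
          by_contra hh
          rw [List.getElem?_eq_none (by omega : cs.length ≤ i)] at hg
          exact absurd hg (by simp)
        omega
  rcases pv_rfind_spec (cs.take (min n pos)) '(' with ⟨h1, h2⟩ | ⟨k, h1, h2, h3, h4⟩
  · left
    refine ⟨by rw [hexp]; simp [h1], ?_⟩
    intro i hi hgi
    exact h2 i ((htake i).2 ⟨hi, hgi⟩)
  · right
    have h3' := (htake k).1 h3
    refine ⟨k, ?_, h3'.1, h3'.2, ?_⟩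
    · rw [hexp, h1]
      have hne : ¬ ((k : Int) = -1) := by omega
      simp [hne]
    · intro i hki hip hgi
      exact h4 i hki ((htake i).2 ⟨hip, hgi⟩)

theorem pv_rfindFrom_lt (expr : String) (pos : Nat)
    (h : PySem.Str.rfindFrom expr "(" 0 (some (pos : Int)) ≠ -1) :
    (PySem.Str.rfindFrom expr "(" 0 (some (pos : Int))).toNat < pos := by
  rcases pv_rfindFrom_spec expr pos with ⟨h1, _⟩ | ⟨k, h1, h2, _, _⟩
  · exact absurd h1 h
  · rw [h1]; simpa using h2

-- Port of A's outer `while True` loop; pos strictly decreases at each `continue`.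
def pvALoop (expr : String) (pos : Nat) : Option (Int × Int) :=
  let p := PySem.Str.rfindFrom expr "(" 0 (some (pos : Int))
  if hp : p = -1 then none
  else
    let pn := p.toNat
    let i := pvWalk expr.toList pn
    if i = pn then pvALoop expr pn
    else
      let close := PySem.Str.findFrom expr ")" (pn : Int)
      if close = -1 then pvALoop expr pn
      else some ((i : Int), close + 1)
termination_by pos
decreasing_by all_goals exact pv_rfindFrom_lt expr pos hp

-- pos starts at len(expr) (an Int in Python, always ≥ 0; tracked as Nat for the loop).
def find_innermost (expr : String) : Option (Int × Int) :=
  pvALoop expr (PySem.Str.len expr).toNat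

-- ===== PORT B =====

-- One step of B's for-loop; state = (best, run_start).
def pvBStep (lastClose : Int) (st : Option (Int × Int) × Int) (kc : Int × Char) :
    Option (Int × Int) × Int :=
  if PySem.Chars.isalpha kc.2 || kc.2 == '_' then st
  else
    ((if kc.2 == '(' && decide (st.2 < kc.1) && decide (kc.1 < lastClose)
      then some (st.2, kc.1) else st.1), kc.1 + 1)

def find_innermost_alt (expr : String) : Option (Int × Int) :=
  let lastClose := PySem.Str.rfind expr ")"
  let r := (PySem.List.enumerate expr.toList 0).foldl (pvBStep lastClose) (none, 0)
  match r.1 with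
  | none => none
  | some (i, p) => some (i, PySem.Str.findFrom expr ")" p + 1)

-- ===== PRECONDITION & SPEC =====
def Spec_find_innermost (expr : String) (out : Option (Int × Int)) : Prop := out = find_innermost_alt expr
instance (expr : String) (out : Option (Int × Int)) : Decidable (Spec_find_innermost expr out) := by unfold Spec_find_innermost; infer_instance

-- ===== CLAIM (what is proved, stated in full; the proofs are below) =====
def Claim_equal_find_innermost : Prop := ∀ (expr : String), Dom_find_innermost expr → Spec_find_innermost expr (find_innermost expr)

-- ===== LEMMAS AND PROOFS =====

-- k is a candidate call position: a '(' preceded by a nonempty identifier run,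
-- with some ')' strictly after it.
def pvCand (cs : List Char) (k : Nat) : Bool :=
  (cs[k]? == some '(') && (pvWalk cs k != k) &&
    decide ((k : Int) < PySem.Chars.rfind cs [')'])

-- Greatest candidate below pos.
def pvBest (cs : List Char) : Nat → Option Nat
  | 0 => none
  | m+1 => if pvCand cs m then some m else pvBest cs m

theorem pvWalk_le (cs : List Char) (i : Nat) : pvWalk cs i ≤ i := by
  induction i with
  | zero => simp [pvWalk]
  | succ i ih => simp only [pvWalk]; split_ifs <;> omega

theorem pvBest_none (cs : List Char) (pos : Nat)
    (h : ∀ j < pos, cs[j]? ≠ some '(') : pvBest cs pos = none := by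
  induction pos with
  | zero => rfl
  | succ m ih =>
      have hc : pvCand cs m = false := by
        simp [pvCand]
        intro hg
        exact absurd hg (h m (by omega))
      simp [pvBest, hc]
      exact ih (fun j hj => h j (by omega))

theorem pvBest_skip (cs : List Char) (k pos : Nat) (hk : k < pos)
    (h : ∀ j, k < j → j < pos → cs[j]? ≠ some '(') :
    pvBest cs pos = pvBest cs (k + 1) := by
  induction pos with
  | zero => omega
  | succ m ih =>
      rcases Nat.lt_or_ge k m with hlt | hge
      · have hc : pvCand cs m = false := by
          simp [pvCand]
          intro hg
          exact absurd hg (h m (by omega) (by omega))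
        simp only [pvBest, hc, Bool.false_eq_true, if_false]
        exact ih (by omega) (fun j hj1 hj2 => h j hj1 (by omega))
      · have : k = m := by omega
        subst this; rfl

-- existence of a ')' strictly after k, via rfind over the whole string
theorem pv_lt_rfind_iff (cs : List Char) (k : Nat) :
    ((k : Int) < PySem.Chars.rfind cs [')']) ↔ (∃ c, k < c ∧ cs[c]? = some ')') := by
  rcases pv_rfind_spec cs ')' with ⟨h1, h2⟩ | ⟨m, h1, h2, h3, h4⟩
  · rw [h1]
    constructor
    · intro h; omega
    · rintro ⟨c, _, hc⟩; exact absurd hc (h2 c)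
  · rw [h1]
    constructor
    · intro h
      exact ⟨m, by omega, h3⟩
    · rintro ⟨c, hkc, hc⟩
      have hcm : c ≤ m := by
        by_contra hh
        exact (h4 c (by omega)) hc
      omega

-- find(')', k): -1 iff no ')' at or after k
theorem pv_findFrom_eq_neg_one_iff (expr : String) (k : Nat) (hk : k ≤ expr.toList.length) :
    (PySem.Str.findFrom expr ")" (k : Int) = -1 ↔ ¬ ∃ c, k ≤ c ∧ expr.toList[c]? = some ')') := by
  have := PySem.Chars.findFrom_natCast_eq_neg_one_iff expr.toList [')'] k hk
  rw [show PySem.Str.findFrom expr ")" (k : Int) = PySem.Chars.findFrom expr.toList [')'] (k : Int) by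
        simp]
  rw [this]
  rw [List.singleton_infix_iff]
  constructor
  · intro h hex
    rcases hex with ⟨c, hkc, hc⟩
    apply h
    rw [List.mem_iff_getElem?]
    exact ⟨c - k, by rw [List.getElem?_drop]; rw [show k + (c - k) = c by omega]; exact hc⟩
  · intro h hmem
    rw [List.mem_iff_getElem?] at hmem
    rcases hmem with ⟨j, hj⟩
    rw [List.getElem?_drop] at hj
    exact h ⟨k + j, by omega, hj⟩

-- final selection applied to a candidate
def pvF (expr : String) (k : Nat) : Int × Int :=
  ((pvWalk expr.toList k : Int), PySem.Str.findFrom expr ")" (k : Int) + 1)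

-- A's loop returns the selection of the greatest candidate below pos.
theorem pvALoop_eq (expr : String) : ∀ (pos : Nat), pos ≤ expr.toList.length →
    pvALoop expr pos = (pvBest expr.toList pos).map (pvF expr) := by
  intro pos
  induction pos using Nat.strong_induction_on with
  | h pos ih =>
  intro hpos
  rw [pvALoop]
  rcases pv_rfindFrom_spec expr pos with ⟨h1, h2⟩ | ⟨k, h1, h2, h3, h4⟩
  · simp only [h1]
    rw [pvBest_none expr.toList pos h2]
    rfl
  · have hne : ¬ (PySem.Str.rfindFrom expr "(" 0 (some (pos : Int)) = -1) := by
      rw [h1]; omega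
    simp only [hne, dif_neg, not_false_iff]
    have htn : (PySem.Str.rfindFrom expr "(" 0 (some (pos : Int))).toNat = k := by
      rw [h1]; simp
    rw [htn]
    have hbest : pvBest expr.toList pos = pvBest expr.toList (k + 1) := pvBest_skip _ k pos h2 h4
    have hkn : k < expr.toList.length := by
      by_contra hh
      simp [List.getElem?_eq_none (by omega : expr.toList.length ≤ k)] at h3
    by_cases hw : pvWalk expr.toList k = k
    · -- bare parenthesis: skip
      have hc : pvCand expr.toList k = false := by simp [pvCand, hw]
      simp only [hw]
      rw [ih k (by omega) (by omega), hbest]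
      simp [pvBest, hc]
    · rw [if_neg hw]
      have hcand_close : pvCand expr.toList k =
          decide ((k : Int) < PySem.Chars.rfind expr.toList [')']) := by
        simp [pvCand, h3, hw]
      by_cases hcl : PySem.Str.findFrom expr ")" (k : Int) = -1
      · -- no close: skip
        have hnoc : ¬ ∃ c, k ≤ c ∧ expr.toList[c]? = some ')' :=
          (pv_findFrom_eq_neg_one_iff expr k (by omega)).1 hcl
        have hc : pvCand expr.toList k = false := by
          rw [hcand_close]
          simp only [decide_eq_false_iff_not]
          rw [pv_lt_rfind_iff]
          rintro ⟨c, hkc, hc⟩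
          exact hnoc ⟨c, by omega, hc⟩
        simp only [hcl]
        rw [ih k (by omega) (by omega), hbest]
        simp [pvBest, hc]
      · -- found: return
        have hex : ∃ c, k ≤ c ∧ expr.toList[c]? = some ')' := by
          by_contra hh
          exact hcl ((pv_findFrom_eq_neg_one_iff expr k (by omega)).2 hh)
        have hex' : ∃ c, k < c ∧ expr.toList[c]? = some ')' := by
          rcases hex with ⟨c, hkc, hc⟩
          refine ⟨c, ?_, hc⟩
          rcases Nat.lt_or_ge k c with h | h
          · exact h
          · have : c = k := by omega
            subst this
            rw [h3] at hc
            simp at hc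
        have hc : pvCand expr.toList k = true := by
          rw [hcand_close]
          simp only [decide_eq_true_iff]
          exact (pv_lt_rfind_iff _ _).2 hex'
        simp only [hcl, if_neg, not_false_iff]
        rw [hbest]
        simp [pvBest, hc, pvF]

-- candidate data as B's fold stores it
def pvG (cs : List Char) (k : Nat) : Int × Int := ((pvWalk cs k : Int), (k : Int))

-- B's fold invariant: folding the tail from position m turns state-at-m into state-at-n.
theorem pvBFold_inv (expr : String) (m : Nat) (hm : m ≤ expr.toList.length) :
    (PySem.List.enumerate (expr.toList.drop m) (m : Int)).foldl
        (pvBStep (PySem.Chars.rfind expr.toList [')']))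
        ((pvBest expr.toList m).map (pvG expr.toList), (pvWalk expr.toList m : Int)) =
      ((pvBest expr.toList expr.toList.length).map (pvG expr.toList),
        (pvWalk expr.toList expr.toList.length : Int)) := by
  set cs := expr.toList with hcs
  set n : Nat := cs.length with hn
  obtain ⟨d, hd⟩ : ∃ d, n - m = d := ⟨n - m, rfl⟩
  induction d generalizing m with
  | zero =>
      have : m = n := by omega
      subst this
      rw [List.drop_of_length_le (le_refl _)]
      simp [PySem.List.enumerate]
  | succ d ihd =>
      have hmn : m < n := by omega
      have hdrop : cs.drop m = cs[m] :: cs.drop (m + 1) :=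
        (List.getElem_cons_drop hmn).symm
      rw [hdrop, PySem.List.enumerate_cons, List.foldl_cons]
      have hget : cs[m]? = some cs[m] := List.getElem?_eq_getElem hmn
      have hgetD : (cs[m]?).getD ' ' = cs[m] := by rw [hget]; rfl
      have hstep : pvBStep (PySem.Chars.rfind cs [')'])
            ((pvBest cs m).map (pvG cs), (pvWalk cs m : Int)) ((m : Int), cs[m]) =
          ((pvBest cs (m + 1)).map (pvG cs), (pvWalk cs (m + 1) : Int)) := by
        by_cases hid : (PySem.Chars.isalpha cs[m] || cs[m] == '_') = true
        · -- identifier char: state unchanged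
          have hwalk : pvWalk cs (m + 1) = pvWalk cs m := by
            simp only [pvWalk, List.getD_eq_getElem?_getD, hget, Option.getD_some]
            simp [hid]
          have hnp : cs[m] ≠ '(' := by
            intro hh
            rw [hh] at hid
            simp [PySem.Chars.isalpha, PySem.Chars.isupper, PySem.Chars.islower] at hid
          have hc : pvCand cs m = false := by
            simp [pvCand, hget, hnp]
          simp [pvBStep, hid, pvBest, hc, hwalk]
        · have hid' : (PySem.Chars.isalpha cs[m] || cs[m] == '_') = false := by
            simpa using hid
          have hwalk : pvWalk cs (m + 1) = m + 1 := by
            simp only [pvWalk, List.getD_eq_getElem?_getD, hget, Option.getD_some]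
            simp [hid']
          have hwle := pvWalk_le cs m
          have hrs : (decide ((pvWalk cs m : Int) < (m : Int))) = (pvWalk cs m != m) := by
            by_cases hh : pvWalk cs m = m
            · simp [hh]
            · have : (pvWalk cs m : Int) < (m : Int) := by
                have : pvWalk cs m < m := by omega
                exact_mod_cast this
              simp [hh, this]
          have hc : pvCand cs m = ((cs[m] == '(') && (pvWalk cs m != m) &&
              decide ((m : Int) < PySem.Chars.rfind cs [')'])) := by
            simp [pvCand, hget]
          by_cases hpar : (cs[m] == '(' && (pvWalk cs m != m) &&
              decide ((m : Int) < PySem.Chars.rfind cs [')'])) = true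
          · have hcand : pvCand cs m = true := by rw [hc]; exact hpar
            have hcond : (cs[m] == '(' && decide ((pvWalk cs m : Int) < (m : Int)) &&
                decide ((m : Int) < PySem.Chars.rfind cs [')'])) = true := by
              rw [hrs]; exact hpar
            simp only [pvBStep, hid, Bool.false_eq_true, if_false, hcond, if_pos]
            simp [pvBest, hcand, pvG, hwalk]
          · have hcand : pvCand cs m = false := by rw [hc]; exact Bool.not_eq_true _ ▸ (by simpa using hpar)
            have hcond : (cs[m] == '(' && decide ((pvWalk cs m : Int) < (m : Int)) &&
                decide ((m : Int) < PySem.Chars.rfind cs [')'])) = false := by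
              rw [hrs]; simpa using hpar
            simp only [pvBStep, hid, Bool.false_eq_true, if_false, hcond]
            simp [pvBest, hcand, hwalk]
      rw [hstep]
      have := ihd (m + 1) (by omega) (by omega)
      rw [show ((m : Int) + 1) = ((m + 1 : Nat) : Int) by push_cast; ring]
      exact this

-- B computes the same selection.
theorem pvBMain (expr : String) :
    find_innermost_alt expr =
      (pvBest expr.toList expr.toList.length).map (pvF expr) := by
  have h0 := pvBFold_inv expr 0 (by omega)
  rw [find_innermost_alt]
  have hrf : PySem.Str.rfind expr ")" = PySem.Chars.rfind expr.toList [')'] := by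
    simp [PySem.Str.rfind]
  simp only [hrf]
  rw [show ((0 : Nat) : Int) = 0 by rfl] at h0
  simp only [List.drop_zero, pvBest, pvWalk, Option.map_none, Nat.cast_zero] at h0
  rw [h0]
  cases hb : pvBest expr.toList expr.toList.length with
  | none => rfl
  | some k => simp [pvG, pvF]

-- ===== VERDICT (by name: the statement is the Claim_ definition above) =====
theorem find_innermost_spec : Claim_equal_find_innermost := by
  intro expr _
  unfold Spec_find_innermost
  rw [find_innermost]
  have hlen : (PySem.Str.len expr).toNat = expr.toList.length := by
    simp [PySem.Str.len]
  rw [hlen, pvALoop_eq expr _ (le_refl _), pvBMain]
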